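-- pv_equiv track=rewrite | github.com/HaRaOne/library_atcoder | library_atcoder.py | repeat_any_square
-- ===== SOURCE A (Python) =====
-- def repeat_any_square( a,n ):
--     if n == 1:
--         return a
--     x = repeat_any_square( a,n//2 )
--     x *= x
--     if n % 2 == 1:
--         x *= a
--     return x
-- ===== SOURCE B (Python) =====
-- def repeat_any_square(a, n):
--     # Iterative left-to-right binary exponentiation: collect the bits of n
--     # below its leading set bit, then square-and-multiply MSB-first.
--     bits = []
--     m = n
--     while m > 1:
--         bits.append(m & 1)
--         m >>= 1
--     result = a
--     for bit in reversed(bits):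
--         result *= result
--         if bit:
--             result *= a
--     return result
-- ===== Notes on version B (the rewrite author's own statement) =====
-- stated objective: alternative
-- what changed: Replaces the top-down recursion (recurse on n//2, then square and conditionally multiply on the way back) with an explicit iterative left-to-right square-and-multiply loop over the collected bits of n, using no recursion.
import Mathlib
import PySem

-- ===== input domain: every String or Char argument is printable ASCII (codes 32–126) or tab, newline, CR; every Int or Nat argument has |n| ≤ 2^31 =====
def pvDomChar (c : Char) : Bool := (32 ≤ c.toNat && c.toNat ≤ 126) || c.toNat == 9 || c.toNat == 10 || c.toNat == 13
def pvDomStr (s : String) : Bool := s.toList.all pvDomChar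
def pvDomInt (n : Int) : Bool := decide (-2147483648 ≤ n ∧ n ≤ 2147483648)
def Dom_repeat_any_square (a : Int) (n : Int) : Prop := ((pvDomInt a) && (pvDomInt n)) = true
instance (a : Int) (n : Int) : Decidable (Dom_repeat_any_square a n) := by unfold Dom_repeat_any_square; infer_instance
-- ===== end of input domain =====

-- B replaces A's top-down recursion with an iterative left-to-right square-and-multiply
-- over the collected bits of n (objective: alternative decomposition, no recursion in B).

-- ===== PORT A =====
-- fuel makes A's recursion total in Lean; with Pre_ (1 ≤ n) the fuel n.toNat is never exhausted
def repAuxA (fuel : Nat) (a : Int) (n : Int) : Int :=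
  match fuel with
  | 0 => 0
  | fuel + 1 =>
    if n = 1 then a
    else
      let x := repAuxA fuel a (PySem.Int.floordiv n 2)
      let x := x * x
      if PySem.Int.mod n 2 = 1 then x * a else x

def repeat_any_square (a : Int) (n : Int) : Int := repAuxA n.toNat a n

-- ===== PORT B =====
-- the python while-loop: bits of n below the leading set bit, LSB-side-first
def bitsB (m : Int) : List Int :=
  if h : 1 < m then PySem.Int.mod m 2 :: bitsB (PySem.Int.floordiv m 2) else []
termination_by m.toNat
decreasing_by
  have : PySem.Int.floordiv m 2 = m / 2 := PySem.Int.floordiv_eq_ediv_of_pos (by omega)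
  rw [this]; omega

def repeat_any_square_alt (a : Int) (n : Int) : Int :=
  (bitsB n).reverse.foldl (fun r b => let r2 := r * r; if b ≠ 0 then r2 * a else r2) a

-- ===== PRECONDITION & SPEC =====
-- Pre_ excludes n ≤ 0, on which Python A recurses forever (RecursionError)
def Pre_repeat_any_square (a : Int) (n : Int) : Prop := 1 ≤ n
instance (a : Int) (n : Int) : Decidable (Pre_repeat_any_square a n) := by
  unfold Pre_repeat_any_square; infer_instance
def pvWitness_repeat_any_square : Int × Int := (3, 5)

def Spec_repeat_any_square (a : Int) (n : Int) (out : Int) : Prop := out = repeat_any_square_alt a n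
instance (a : Int) (n : Int) (out : Int) : Decidable (Spec_repeat_any_square a n out) := by
  unfold Spec_repeat_any_square; infer_instance

-- ===== CLAIM (what is proved, stated in full; the proofs are below) =====
def Claim_equal_repeat_any_square : Prop := ∀ (a : Int) (n : Int), Dom_repeat_any_square a n → Pre_repeat_any_square a n → Spec_repeat_any_square a n (repeat_any_square a n)

-- ===== LEMMAS AND PROOFS =====

lemma repAuxA_eq_pow (fuel : Nat) (a n : Int) (h1 : 1 ≤ n) (hf : n.toNat ≤ fuel) :
    repAuxA fuel a n = a ^ n.toNat := by
  induction fuel generalizing n with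
  | zero => omega
  | succ fuel ih =>
    rw [repAuxA]
    by_cases h : n = 1
    · simp [h]
    · have h2 : 2 ≤ n := by omega
      have hd : PySem.Int.floordiv n 2 = n / 2 := PySem.Int.floordiv_eq_ediv_of_pos (by omega)
      have hm : PySem.Int.mod n 2 = n % 2 := PySem.Int.mod_eq_emod_of_pos (by omega)
      have hrec : repAuxA fuel a (PySem.Int.floordiv n 2) = a ^ (PySem.Int.floordiv n 2).toNat := by
        apply ih
        · rw [hd]; omega
        · rw [hd]; omega
      have hk : (PySem.Int.floordiv n 2).toNat = n.toNat / 2 := by rw [hd]; omega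
      simp only [h, if_false, hrec, hk, hm]
      by_cases ho : n % 2 = 1
      · rw [if_pos ho]
        have hn : n.toNat = n.toNat / 2 + n.toNat / 2 + 1 := by omega
        conv_rhs => rw [hn]
        rw [pow_succ, pow_add]
      · rw [if_neg ho]
        have hn : n.toNat = n.toNat / 2 + n.toNat / 2 := by omega
        conv_rhs => rw [hn]
        rw [pow_add]

lemma bitsB_foldl_aux (a : Int) (N : Nat) (m : Int) (hN : m.toNat ≤ N) (h1 : 1 ≤ m) :
    (bitsB m).reverse.foldl (fun r b => let r2 := r * r; if b ≠ 0 then r2 * a else r2) a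
      = a ^ m.toNat := by
  induction N generalizing m with
  | zero => omega
  | succ N ih =>
    by_cases h : 1 < m
    · rw [bitsB, dif_pos h]
      have hd : PySem.Int.floordiv m 2 = m / 2 := PySem.Int.floordiv_eq_ediv_of_pos (by omega)
      have hmod : PySem.Int.mod m 2 = m % 2 := PySem.Int.mod_eq_emod_of_pos (by omega)
      rw [List.reverse_cons, List.foldl_append]
      rw [ih (PySem.Int.floordiv m 2) (by rw [hd]; omega) (by rw [hd]; omega)]
      have hk : (PySem.Int.floordiv m 2).toNat = m.toNat / 2 := by rw [hd]; omega
      simp only [List.foldl, hk, hmod]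
      by_cases ho : m % 2 = 0
      · rw [if_neg (by simp [ho])]
        have hn : m.toNat = m.toNat / 2 + m.toNat / 2 := by omega
        conv_rhs => rw [hn]
        rw [pow_add]
      · rw [if_pos (by simpa using ho)]
        have hn : m.toNat = m.toNat / 2 + m.toNat / 2 + 1 := by omega
        conv_rhs => rw [hn]
        rw [pow_succ, pow_add]
    · have hm1 : m = 1 := by omega
      subst hm1
      rw [bitsB, dif_neg (by norm_num)]
      simp

-- ===== VERDICT (by name: the statement is the Claim_ definition above) =====
theorem repeat_any_square_spec : Claim_equal_repeat_any_square := by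
  intro a n _ hpre
  unfold Spec_repeat_any_square repeat_any_square repeat_any_square_alt
  rw [repAuxA_eq_pow n.toNat a n hpre le_rfl, bitsB_foldl_aux a n.toNat n le_rfl hpre]
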